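-- pv_equiv track=rewrite | github.com/impact-lbl/IMPACT-Z | utilities/lattice_parser/lattice_parser.py | _delete_redundant_comma
-- ===== SOURCE A (Python) =====
-- def _delete_redundant_comma(lines):
--     '''
--     delete all redundant comma,
--     delete quatation marks in each line.
--     '''
--     j = 0
--     for line in lines:
--         # rpn expression expand, change here
--         # remove quatation marks in line, ' ' and " "
--         #line = line.replace('\'','').replace('\"','')
--
--         # remove redundant comma
--         tmplist = line.split(',')
--
--         # remove all the '' in tmplist
--         while '' in tmplist:
--             tmplist.remove('')
--
--         # replace lines[j] with no-redundant comma string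
--         lines[j] = ','.join( tmplist)
--         j += 1
--
--     return lines
-- ===== SOURCE B (Python) =====
-- def _delete_redundant_comma(lines):
--     '''
--     delete all redundant comma,
--     delete quatation marks in each line.
--     '''
--     for i, line in enumerate(lines):
--         # single left-to-right pass: emit a comma only between two kept characters
--         out = []
--         pending = False
--         for ch in line:
--             if ch == ',':
--                 if out:
--                     pending = True
--             else:
--                 if pending:
--                     out.append(',')
--                     pending = False
--                 out.append(ch)
--         lines[i] = ''.join(out)
--     return lines
-- ===== Notes on version B (the rewrite author's own statement) =====
-- stated objective: alternative
-- what changed: Per line, A splits on ',', repeatedly scans-and-removes empty tokens with a while loop, and rejoins; B makes one left-to-right pass over the characters with a pending-comma flag, emitting a comma only between two kept characters.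
import Mathlib
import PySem

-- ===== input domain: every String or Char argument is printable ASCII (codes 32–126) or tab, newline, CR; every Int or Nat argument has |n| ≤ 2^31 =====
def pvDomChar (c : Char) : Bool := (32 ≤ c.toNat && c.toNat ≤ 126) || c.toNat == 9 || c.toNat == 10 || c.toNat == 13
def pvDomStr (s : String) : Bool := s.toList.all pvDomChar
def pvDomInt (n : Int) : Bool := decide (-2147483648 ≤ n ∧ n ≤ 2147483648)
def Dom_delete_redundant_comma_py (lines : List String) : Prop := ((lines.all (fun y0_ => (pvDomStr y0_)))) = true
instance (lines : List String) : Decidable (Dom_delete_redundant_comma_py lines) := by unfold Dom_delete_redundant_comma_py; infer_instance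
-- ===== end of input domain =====

-- B replaces A's split / while-remove('') / join per line by one left-to-right pass that
-- emits a comma only between two kept characters (alternative decomposition; both A and B
-- mutate `lines` in place in Python — the equivalence proved here is about the return value).

-- ===== PORT A =====
-- A's `while '' in tmplist: tmplist.remove('')` loop, transliterated
def removeEmptyLoop (l : List (List Char)) : List (List Char) :=
  if ([] : List Char) ∈ l then
    match h : PySem.List.remove? l ([] : List Char) with
    | some l' => removeEmptyLoop l'
    | none => l
  else l
termination_by l.length
decreasing_by
  have hm : ([] : List Char) ∈ l := by assumption
  rw [PySem.List.remove?_eq_some_erase _ _ hm] at h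
  cases h
  have : l.length ≠ 0 := by
    intro h0; rw [List.length_eq_zero_iff] at h0; subst h0; simp at hm
  have := List.length_erase_of_mem hm
  omega

def delete_redundant_comma_py (lines : List String) : List String :=
  lines.map (fun line =>
    String.ofList (PySem.Chars.join [','] (removeEmptyLoop (PySem.Chars.splitOn line.toList [',']))))

-- ===== PORT B =====
-- Source B's inner character loop: state = (out, pending)
def commaSqueeze (cs : List Char) (out : List Char) (pending : Bool) : List Char :=
  match cs with
  | [] => out
  | c :: rest =>
    if c = ',' then
      commaSqueeze rest out (if out = [] then pending else true)
    else
      commaSqueeze rest ((if pending then out ++ [','] else out) ++ [c]) false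

def delete_redundant_comma_py_alt (lines : List String) : List String :=
  lines.map (fun line => String.ofList (commaSqueeze line.toList [] false))

-- ===== PRECONDITION & SPEC =====
def Spec_delete_redundant_comma_py (lines : List String) (out : List String) : Prop := out = delete_redundant_comma_py_alt lines
instance (lines : List String) (out : List String) : Decidable (Spec_delete_redundant_comma_py lines out) := by unfold Spec_delete_redundant_comma_py; infer_instance

-- ===== CLAIM (what is proved, stated in full; the proofs are below) =====
def Claim_equal_delete_redundant_comma_py : Prop := ∀ (lines : List String), Dom_delete_redundant_comma_py lines → Spec_delete_redundant_comma_py lines (delete_redundant_comma_py lines)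

-- ===== LEMMAS AND PROOFS =====

-- a simple structural model of s.split(',')
def split1 : List Char → List (List Char)
  | [] => [[]]
  | c :: cs =>
    if c = ',' then [] :: split1 cs
    else match split1 cs with
      | [] => [[c]]
      | s :: rest => (c :: s) :: rest

lemma split1_ne_nil (cs : List Char) : split1 cs ≠ [] := by
  cases cs with
  | nil => simp [split1]
  | cons c cs => simp only [split1]; split_ifs; · simp
                 · split <;> simp

lemma go_spec (fuel : Nat) (l cur : List Char) (acc : List (List Char))
    (h : l.length ≤ fuel) :
    PySem.Chars.splitOn.go [','] fuel l cur acc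
      = acc.reverse ++ List.modifyHead (cur.reverse ++ ·) (split1 l) := by
  induction fuel generalizing l cur acc with
  | zero =>
    have : l = [] := by cases l <;> simp_all
    subst this
    simp [PySem.Chars.splitOn.go, split1]
  | succ f ih =>
    cases l with
    | nil => simp [PySem.Chars.splitOn.go, split1]
    | cons c rest =>
      rw [PySem.Chars.splitOn.go]
      by_cases hc : c = ','
      · subst hc
        simp only [List.isPrefixOf, BEq.rfl, Bool.true_and, List.isPrefixOf_nil_left, if_pos]
        rw [ih _ _ _ (by simpa using Nat.le_of_succ_le_succ h)]
        cases hsp : split1 rest <;> simp [split1, hsp, List.modifyHead]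
      · have hpre : [','].isPrefixOf (c :: rest) = false := by
          simp [List.isPrefixOf]; exact fun hco => absurd hco.symm hc
        rw [hpre]
        simp only [Bool.false_eq_true, if_false]
        rw [ih _ _ _ (by simpa using Nat.le_of_succ_le_succ h)]
        simp only [split1, if_neg hc]
        rcases hsp : split1 rest with _ | ⟨s, r⟩
        · exact absurd hsp (split1_ne_nil rest)
        · simp

lemma splitOn_eq_split1 (cs : List Char) : PySem.Chars.splitOn cs [','] = split1 cs := by
  rw [PySem.Chars.splitOn, go_spec _ _ _ _ (by omega)]
  rcases h : split1 cs with _ | ⟨s, r⟩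
  · exact absurd h (split1_ne_nil cs)
  · simp

-- A's while-remove loop removes exactly the empty tokens
lemma filter_erase_nil (l : List (List Char)) :
    (l.erase ([] : List Char)).filter (· ≠ []) = l.filter (· ≠ []) := by
  induction l with
  | nil => simp
  | cons x xs ih =>
    simp only [List.erase_cons]
    by_cases hx : x = ([] : List Char)
    · subst hx; simp
    · rw [if_neg (by simpa using hx)]
      simp only [List.filter_cons]
      by_cases hP : (decide (x ≠ []) : Bool) = true
      · simp only [hP]
        rw [ih]
      · simp only [hP]
        rw [ih]

lemma removeEmptyLoop_eq_filter (l : List (List Char)) :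
    removeEmptyLoop l = l.filter (· ≠ []) := by
  induction hn : l.length using Nat.strong_induction_on generalizing l with
  | _ n ih =>
  rw [removeEmptyLoop]
  by_cases hm : ([] : List Char) ∈ l
  · rw [if_pos hm, PySem.List.remove?_eq_some_erase _ _ hm]
    have hlen : (l.erase ([] : List Char)).length < l.length := by
      have : l.length ≠ 0 := by
        intro h0; rw [List.length_eq_zero_iff] at h0; subst h0; simp at hm
      have := List.length_erase_of_mem hm
      omega
    split
    next l' heq =>
      injection heq with heq'
      subst heq'
      rw [ih _ (by rw [← hn]; exact hlen) _ rfl, filter_erase_nil]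
    next heq => exact absurd heq (by simp)
  · simp only [if_neg hm]
    symm
    rw [List.filter_eq_self]
    intro a ha
    simp only [ne_eq, decide_not, Bool.not_eq_eq_eq_not, Bool.not_true, decide_eq_false_iff_not]
    intro hEq; subst hEq; exact hm ha

-- join with "," of a cons
lemma joinC_cons (x : List Char) (L : List (List Char)) :
    PySem.Chars.join [','] (x :: L)
      = x ++ (if L = [] then [] else ',' :: PySem.Chars.join [','] L) := by
  cases L <;> simp [PySem.Chars.join, List.intercalate, List.intersperse]

-- the per-line value both programs compute
def lineF (cs : List Char) : List Char :=
  PySem.Chars.join [','] ((split1 cs).filter (· ≠ []))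

lemma joinC_filter_eq_nil_iff (M : List (List Char)) :
    PySem.Chars.join [','] (M.filter (· ≠ [])) = [] ↔ M.filter (· ≠ []) = [] := by
  constructor
  · intro h
    rcases hL : M.filter (· ≠ []) with _ | ⟨x, L⟩
    · rfl
    · have hx : x ≠ [] := by
        have := List.of_mem_filter (l := M) (p := (· ≠ [])) (a := x) (by rw [hL]; simp)
        simpa using this
      rw [hL, joinC_cons] at h
      rcases List.append_eq_nil_iff.mp h with ⟨hx', _⟩
      exact absurd hx' hx
  · intro h; rw [h]; simp [PySem.Chars.join, List.intercalate]

lemma lineF_comma_cons (cs : List Char) : lineF (',' :: cs) = lineF cs := by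
  simp [lineF, split1]

lemma lineF_cons (c : Char) (cs : List Char) (hc : c ≠ ',') :
    lineF (c :: cs)
      = c :: (if lineF cs = [] then []
              else if cs.head? = some ',' then ',' :: lineF cs else lineF cs) := by
  cases cs with
  | nil => simp [lineF, split1, hc, PySem.Chars.join, List.intercalate]
  | cons d cs' =>
    by_cases hd : d = ','
    · subst hd
      have h1 : split1 (c :: ',' :: cs') = [c] :: split1 cs' := by
        simp [split1, hc]
      have h2 : lineF (',' :: cs') = lineF cs' := lineF_comma_cons cs'
      rw [lineF, h1]
      rw [List.filter_cons_of_pos (by simp)]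
      rw [joinC_cons]
      rw [h2]
      by_cases hnil : (split1 cs').filter (· ≠ []) = []
      · have : lineF cs' = [] := by
          rw [lineF, hnil]; simp [PySem.Chars.join, List.intercalate]
        rw [if_pos hnil, this]
        simp
      · have : lineF cs' ≠ [] := by
          rw [lineF]; intro h
          exact hnil ((joinC_filter_eq_nil_iff _).mp h)
        rw [if_neg hnil, if_neg this]
        simp [lineF]
    · -- cs = d :: cs' with d ≠ ','
      rcases hsp : split1 cs' with _ | ⟨s, r⟩
      · exact absurd hsp (split1_ne_nil cs')
      have h1 : split1 (d :: cs') = (d :: s) :: r := by simp [split1, hd, hsp]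
      have h2 : split1 (c :: d :: cs') = (c :: d :: s) :: r := by
        simp [split1, hc, hd, hsp]
      have hne : lineF (d :: cs') ≠ [] := by
        rw [lineF, h1, List.filter_cons_of_pos (by simp), joinC_cons]
        simp
      rw [if_neg hne, if_neg (by simp [hd])]
      rw [lineF, h2, List.filter_cons_of_pos (by simp), joinC_cons]
      rw [lineF, h1, List.filter_cons_of_pos (by simp), joinC_cons]
      simp

lemma commaSqueeze_spec (cs : List Char) (out : List Char) (pending : Bool)
    (h : out = [] → pending = false) :
    commaSqueeze cs out pending
      = out ++ (if out = [] then lineF cs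
                else if lineF cs = [] then []
                else if pending || (cs.head? = some ',' : Bool) then ',' :: lineF cs
                else lineF cs) := by
  induction cs generalizing out pending with
  | nil =>
    simp only [commaSqueeze, lineF, split1]
    by_cases ho : out = [] <;>
      simp [ho, PySem.Chars.join, List.intercalate]
  | cons c rest ih =>
    by_cases hc : c = ','
    · subst hc
      rw [commaSqueeze, if_pos rfl]
      by_cases ho : out = []
      · subst ho
        rw [if_pos rfl, ih [] pending h, lineF_comma_cons]
        simp
      · rw [if_neg ho, ih out true (fun h' => absurd h' ho)]
        rw [if_neg ho, if_neg ho, lineF_comma_cons]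
        by_cases hL : lineF rest = []
        · simp [hL]
        · simp [hL]
    · rw [commaSqueeze, if_neg hc]
      have hnew : (if pending then out ++ [','] else out) ++ [c] ≠ [] := by
        split <;> simp
      rw [ih _ false (fun h' => absurd h' hnew)]
      rw [if_neg hnew]
      rw [lineF_cons c rest hc]
      by_cases ho : out = []
      · subst ho
        have hp : pending = false := h rfl
        subst hp
        simp only [if_pos rfl, if_neg (List.cons_ne_nil c [])]
        by_cases hL : lineF rest = []
        · simp [hL]
        · by_cases hh : rest.head? = some ','
          · simp [hL, hh]
          · simp [hL, hh]
      · rw [if_neg ho]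
        have hcons : (c :: (if lineF rest = [] then []
            else if rest.head? = some ',' then ',' :: lineF rest else lineF rest)) ≠ [] := by
          simp
        rw [if_neg hcons]
        have hhead : ¬ ((c :: (if lineF rest = [] then []
            else if rest.head? = some ',' then ',' :: lineF rest else lineF rest)).head? = some ',') := by
          simp [hc]
        cases pending with
        | false =>
          simp only [Bool.false_or]
          rw [if_neg (by simpa using hhead)]
          by_cases hL : lineF rest = []
          · simp [hL, hc]
          · by_cases hh : rest.head? = some ','
            · simp [hL, hh, hc]
            · simp [hL, hh, hc]
        | true =>
          simp only [Bool.true_or, if_pos]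
          by_cases hL : lineF rest = []
          · simp [hL, hc]
          · by_cases hh : rest.head? = some ','
            · simp [hL, hh, hc]
            · simp [hL, hh, hc]

lemma per_line (cs : List Char) :
    PySem.Chars.join [','] (removeEmptyLoop (PySem.Chars.splitOn cs [',']))
      = commaSqueeze cs [] false := by
  rw [splitOn_eq_split1, removeEmptyLoop_eq_filter,
      commaSqueeze_spec cs [] false (fun _ => rfl)]
  simp [lineF]

-- ===== VERDICT (by name: the statement is the Claim_ definition above) =====
theorem delete_redundant_comma_py_spec : Claim_equal_delete_redundant_comma_py := by
  intro lines _
  unfold Spec_delete_redundant_comma_py delete_redundant_comma_py delete_redundant_comma_py_alt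
  apply List.map_congr_left
  intro line _
  rw [per_line]
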